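-- pv_equiv track=rewrite | github.com/strainhzj/BtDeck | app/services/speed_schedule_service.py | calculate_effective_speed
-- ===== SOURCE A (Python) =====
-- from typing import List, Dict
--
-- def calculate_effective_speed(rules: List[Dict]) -> Dict:
--     """
--     根据生效规则计算当前应应用的速度
--     """
--     result = {
--         "dl_speed": 0,
--         "dl_unit": 0,
--         "ul_speed": 0,
--         "ul_unit": 0
--     }
--
--     # sort_order 数字越小优先级越高，优先级高的先命中并固定
--     for rule in rules:
--         if result["dl_speed"] == 0 and rule.get("dl_speed_limit", 0) > 0:
--             result["dl_speed"] = rule["dl_speed_limit"]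
--             result["dl_unit"] = rule.get("dl_speed_unit", 0)
--
--         if result["ul_speed"] == 0 and rule.get("ul_speed_limit", 0) > 0:
--             result["ul_speed"] = rule["ul_speed_limit"]
--             result["ul_unit"] = rule.get("ul_speed_unit", 0)
--
--     return result
-- ===== SOURCE B (Python) =====
-- def calculate_effective_speed(rules):
--     """
--     根据生效规则计算当前应应用的速度
--     """
--     dl = next((r for r in rules if r.get("dl_speed_limit", 0) > 0), None)
--     ul = next((r for r in rules if r.get("ul_speed_limit", 0) > 0), None)
--     return {
--         "dl_speed": dl["dl_speed_limit"] if dl is not None else 0,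
--         "dl_unit": dl.get("dl_speed_unit", 0) if dl is not None else 0,
--         "ul_speed": ul["ul_speed_limit"] if ul is not None else 0,
--         "ul_unit": ul.get("ul_speed_unit", 0) if ul is not None else 0,
--     }
-- ===== Notes on version B (the rewrite author's own statement) =====
-- stated objective: simpler
-- what changed: Replaced A's single interleaved loop over a mutable 4-field accumulator (with 'only set once' guards) by two independent first-match searches (next over the rules) and a one-shot construction of the result dict.
import Mathlib
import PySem

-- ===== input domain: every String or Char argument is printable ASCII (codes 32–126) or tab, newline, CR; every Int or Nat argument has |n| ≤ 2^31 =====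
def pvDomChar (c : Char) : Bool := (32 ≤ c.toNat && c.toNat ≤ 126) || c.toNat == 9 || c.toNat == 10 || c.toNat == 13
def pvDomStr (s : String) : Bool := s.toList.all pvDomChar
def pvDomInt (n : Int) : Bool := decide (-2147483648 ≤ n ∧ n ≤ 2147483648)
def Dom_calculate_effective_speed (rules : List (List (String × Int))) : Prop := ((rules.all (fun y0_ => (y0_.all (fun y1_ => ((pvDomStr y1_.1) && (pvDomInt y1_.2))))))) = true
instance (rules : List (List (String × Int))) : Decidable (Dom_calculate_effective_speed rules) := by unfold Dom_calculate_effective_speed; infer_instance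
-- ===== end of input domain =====

-- B replaces A's interleaved, accumulator-guarded single loop by two independent
-- first-match searches (next(...) over the rules) and builds the result dict once
-- from the two hits; objective: simpler. Same O(n) cost.

-- rule.get(k, 0) on a rule dict (association list, first match wins); shared lookup helper
def pyGetd (rule : List (String × Int)) (k : String) (d : Int) : Int :=
  ((rule.find? (fun p => p.1 == k)).map Prod.snd).getD d

-- r.get("dl_speed_limit", 0) > 0 / r.get("ul_speed_limit", 0) > 0
def dlPos (r : List (String × Int)) : Bool := decide (0 < pyGetd r "dl_speed_limit" 0)
def ulPos (r : List (String × Int)) : Bool := decide (0 < pyGetd r "ul_speed_limit" 0)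

-- ===== PORT A =====
-- the body of A's `for rule in rules:` loop; rule["dl_speed_limit"] is ported as
-- pyGetd rule "dl_speed_limit" 0, exact here because the guard just established the key
-- is present (its .get with default 0 was > 0); same for ul.
def csA_step (res : PySem.Dict String Int) (rule : List (String × Int)) : PySem.Dict String Int :=
  let res1 := if res.getD "dl_speed" 0 == 0 && dlPos rule
    then (res.insert "dl_speed" (pyGetd rule "dl_speed_limit" 0)).insert "dl_unit" (pyGetd rule "dl_speed_unit" 0)
    else res
  if res1.getD "ul_speed" 0 == 0 && ulPos rule
    then (res1.insert "ul_speed" (pyGetd rule "ul_speed_limit" 0)).insert "ul_unit" (pyGetd rule "ul_speed_unit" 0)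
    else res1

def calculate_effective_speed (rules : List (List (String × Int))) : List (String × Int) :=
  (rules.foldl csA_step
    (PySem.Dict.ofList [("dl_speed", 0), ("dl_unit", 0), ("ul_speed", 0), ("ul_unit", 0)])).items

-- ===== PORT B =====
def calculate_effective_speed_alt (rules : List (List (String × Int))) : List (String × Int) :=
  let dl := rules.find? dlPos    -- next((r for r in rules if r.get("dl_speed_limit", 0) > 0), None)
  let ul := rules.find? ulPos    -- next((r for r in rules if r.get("ul_speed_limit", 0) > 0), None)
  [("dl_speed", match dl with | some r => pyGetd r "dl_speed_limit" 0 | none => 0),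
   ("dl_unit",  match dl with | some r => pyGetd r "dl_speed_unit" 0 | none => 0),
   ("ul_speed", match ul with | some r => pyGetd r "ul_speed_limit" 0 | none => 0),
   ("ul_unit",  match ul with | some r => pyGetd r "ul_speed_unit" 0 | none => 0)]

-- ===== PRECONDITION & SPEC =====
def Spec_calculate_effective_speed (rules : List (List (String × Int))) (out : List (String × Int)) : Prop := out = calculate_effective_speed_alt rules
instance (rules : List (List (String × Int))) (out : List (String × Int)) : Decidable (Spec_calculate_effective_speed rules out) := by unfold Spec_calculate_effective_speed; infer_instance

-- ===== CLAIM (what is proved, stated in full; the proofs are below) =====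
def Claim_equal_calculate_effective_speed : Prop := ∀ (rules : List (List (String × Int))), Dom_calculate_effective_speed rules → Spec_calculate_effective_speed rules (calculate_effective_speed rules)

-- ===== LEMMAS AND PROOFS =====

-- one step of A's loop on the (always 4-key, fixed-order) result dict
lemma step_eq (d du u uu : Int) (r : List (String × Int)) :
    csA_step (PySem.Dict.mk [("dl_speed",d),("dl_unit",du),("ul_speed",u),("ul_unit",uu)]) r =
    PySem.Dict.mk [
      ("dl_speed", if d = 0 ∧ dlPos r = true then pyGetd r "dl_speed_limit" 0 else d),
      ("dl_unit",  if d = 0 ∧ dlPos r = true then pyGetd r "dl_speed_unit" 0 else du),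
      ("ul_speed", if u = 0 ∧ ulPos r = true then pyGetd r "ul_speed_limit" 0 else u),
      ("ul_unit",  if u = 0 ∧ ulPos r = true then pyGetd r "ul_speed_unit" 0 else uu)] := by
  by_cases hd : d = 0 <;> by_cases hu : u = 0 <;>
    by_cases hdl : dlPos r = true <;> by_cases hul : ulPos r = true <;>
    simp [csA_step, hd, hu, hdl, hul, PySem.Dict.getD, PySem.Dict.get?,
          PySem.Dict.insert, PySem.Dict.contains]

-- A's whole loop from an arbitrary 4-field state: each side is the first match, kept once set
lemma fold_char (rules : List (List (String × Int))) (d du u uu : Int) :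
    rules.foldl csA_step (PySem.Dict.mk [("dl_speed",d),("dl_unit",du),("ul_speed",u),("ul_unit",uu)]) =
    PySem.Dict.mk [
      ("dl_speed", if d = 0 then (match rules.find? dlPos with | some r => pyGetd r "dl_speed_limit" 0 | none => 0) else d),
      ("dl_unit",  if d = 0 then (match rules.find? dlPos with | some r => pyGetd r "dl_speed_unit" 0 | none => du) else du),
      ("ul_speed", if u = 0 then (match rules.find? ulPos with | some r => pyGetd r "ul_speed_limit" 0 | none => 0) else u),
      ("ul_unit",  if u = 0 then (match rules.find? ulPos with | some r => pyGetd r "ul_speed_unit" 0 | none => uu) else uu)] := by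
  induction rules generalizing d du u uu with
  | nil => simp only [List.foldl_nil, List.find?_nil]; split_ifs <;> simp_all
  | cons r rs ih =>
    rw [List.foldl_cons, step_eq, ih]
    by_cases hdl : dlPos r = true <;> by_cases hul : ulPos r = true <;>
      by_cases hd : d = 0 <;> by_cases hu : u = 0 <;>
      · simp only [List.find?_cons, hdl, hul, hd, hu]
        simp_all [dlPos, ulPos] <;> omega

-- ===== VERDICT (by name: the statement is the Claim_ definition above) =====
theorem calculate_effective_speed_spec : Claim_equal_calculate_effective_speed := by
  intro rules _
  show calculate_effective_speed rules = calculate_effective_speed_alt rules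
  unfold calculate_effective_speed calculate_effective_speed_alt
  rw [show (PySem.Dict.ofList [("dl_speed", (0:Int)), ("dl_unit", 0), ("ul_speed", 0), ("ul_unit", 0)]) =
      PySem.Dict.mk [("dl_speed", 0), ("dl_unit", 0), ("ul_speed", 0), ("ul_unit", 0)] from rfl]
  rw [fold_char]
  simp
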